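-- pv_equiv track=rewrite | github.com/Cedricverl/1010- | Block.py | get_vertical_offsets_from_anchor
-- ===== SOURCE A (Python) =====
-- def get_vertical_offsets_from_anchor(block):
--     """
--         Return the vertical offsets from the anchor of this block.
--         - The function returns a tuple involving the smallest vertical offset
--           below the anchor, followed by the largest vertical offset above the anchor.
--           More formally, if the function returns the tuple (B,A), then for each dot
--           position (x,y) of the given block, B <= y <= A
--         ASSUMPTIONS
--         - The given block is a proper block.
--     """
--     most_up_element = None
--     most_down_element = None
--     for dot in block:
--         if most_up_element is None or dot[1] > most_up_element:
--             most_up_element = dot[1]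
--         if most_down_element is None or dot[1] < most_down_element:
--             most_down_element = dot[1]
--     return most_down_element, most_up_element
-- ===== SOURCE B (Python) =====
-- def get_vertical_offsets_from_anchor(block):
--     ys = sorted(dot[1] for dot in block)
--     return ys[0], ys[-1]
-- ===== Notes on version B (the rewrite author's own statement) =====
-- stated objective: alternative
-- what changed: Sorts the y-coordinates once and reads the extremes off the ends of the sorted list instead of A's one-pass running min/max loop over Option state.
-- outside the precondition, e.g. on get_vertical_offsets_from_anchor([]): A returns (None, None), B raises IndexError
import Mathlib
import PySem

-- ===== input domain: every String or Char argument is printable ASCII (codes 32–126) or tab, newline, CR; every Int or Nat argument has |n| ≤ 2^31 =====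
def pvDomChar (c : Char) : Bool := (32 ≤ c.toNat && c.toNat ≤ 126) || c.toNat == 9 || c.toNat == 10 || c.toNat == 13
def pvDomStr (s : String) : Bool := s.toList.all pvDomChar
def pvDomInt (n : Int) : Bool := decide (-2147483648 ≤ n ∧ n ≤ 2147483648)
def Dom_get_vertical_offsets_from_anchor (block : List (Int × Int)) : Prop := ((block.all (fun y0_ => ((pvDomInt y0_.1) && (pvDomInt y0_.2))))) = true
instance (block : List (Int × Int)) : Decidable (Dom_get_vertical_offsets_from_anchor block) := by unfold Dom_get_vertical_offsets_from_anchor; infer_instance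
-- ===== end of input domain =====

-- ===== PORT A =====
-- B sorts the y-coordinates once and reads the extremes off the two ends of the sorted
-- list, instead of A's fused one-pass running min/max loop over mutable Option state.
def get_vertical_offsets_from_anchor (block : List (Int × Int)) : Int × Int :=
  -- loop state = (most_up_element, most_down_element), both starting as None
  let s := block.foldl
    (fun (st : Option Int × Option Int) dot =>
      let up := match st.1 with
        | none => some dot.2
        | some u => if dot.2 > u then some dot.2 else some u
      let down := match st.2 with
        | none => some dot.2
        | some d => if dot.2 < d then some dot.2 else some d
      (up, down))
    (none, none)
  -- Python returns (None, None) on an empty block (excluded by Pre_); .getD 0 is a totality guard only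
  ((s.2).getD 0, (s.1).getD 0)

-- ===== PORT B =====
def get_vertical_offsets_from_anchor_alt (block : List (Int × Int)) : Int × Int :=
  let ys := PySem.List.sorted (block.map (fun dot => dot.2)) (fun y => y) false
  -- ys[0], ys[-1]: IndexError on the empty block (excluded by Pre_); 0 is a totality default only
  (PySem.List.pyGetD ys 0 0, PySem.List.pyGetD ys (-1) 0)

-- ===== PRECONDITION & SPEC =====
-- Pre_ excludes the empty block, on which A returns (None, None) — not a value of the declared int-pair type — and B raises IndexError.
def Pre_get_vertical_offsets_from_anchor (block : List (Int × Int)) : Prop := block ≠ []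
instance (block : List (Int × Int)) : Decidable (Pre_get_vertical_offsets_from_anchor block) := by unfold Pre_get_vertical_offsets_from_anchor; infer_instance
def pvWitness_get_vertical_offsets_from_anchor : (List (Int × Int)) := [(0, 2), (1, -3)]

def Spec_get_vertical_offsets_from_anchor (block : List (Int × Int)) (out : Int × Int) : Prop := out = get_vertical_offsets_from_anchor_alt block
instance (block : List (Int × Int)) (out : Int × Int) : Decidable (Spec_get_vertical_offsets_from_anchor block out) := by unfold Spec_get_vertical_offsets_from_anchor; infer_instance

-- ===== CLAIM (what is proved, stated in full; the proofs are below) =====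
def Claim_equal_get_vertical_offsets_from_anchor : Prop := ∀ (block : List (Int × Int)), Dom_get_vertical_offsets_from_anchor block → Pre_get_vertical_offsets_from_anchor block → Spec_get_vertical_offsets_from_anchor block (get_vertical_offsets_from_anchor block)

-- ===== LEMMAS AND PROOFS =====

-- A's loop over a tail t starting from a populated state keeps both components populated,
-- tracking the running max (first component) and running min (second)
theorem pv_fold_state (t : List (Int × Int)) : ∀ (u d : Int),
    t.foldl
      (fun (st : Option Int × Option Int) dot =>
        let up := match st.1 with
          | none => some dot.2
          | some u => if dot.2 > u then some dot.2 else some u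
        let down := match st.2 with
          | none => some dot.2
          | some d => if dot.2 < d then some dot.2 else some d
        (up, down))
      (some u, some d)
    = (some ((t.map (fun x => x.2)).foldl max u), some ((t.map (fun x => x.2)).foldl min d)) := by
  induction t with
  | nil => intro u d; simp
  | cons a t ih =>
    intro u d
    simp only [List.foldl_cons, List.map_cons]
    have h1 : (if a.2 > u then some a.2 else some u) = some (max u a.2) := by
      split_ifs with h <;> simp <;> omega
    have h2 : (if a.2 < d then some a.2 else some d) = some (min d a.2) := by
      split_ifs with h <;> simp <;> omega
    rw [h1, h2]
    exact ih _ _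

-- the first element of sorted (y :: t) is the running minimum
theorem pv_sorted_head (y : Int) (t : List Int) :
    PySem.List.pyGetD (PySem.List.sorted (y :: t) (fun x => x) false) 0 0 = t.foldl min y := by
  have hmin := PySem.List.min?_id_cons y t
  have hmem : t.foldl min y ∈ y :: t := PySem.List.min?_mem hmin
  have hlow : ∀ z ∈ y :: t, t.foldl min y ≤ z := PySem.List.min?_isMin hmin
  cases hL : PySem.List.sorted (y :: t) (fun x => x) false with
  | nil => exact absurd ((PySem.List.sorted_eq_nil_iff _ _ _).mp hL) (by simp)
  | cons m s =>
    have hmS : m ∈ y :: t := (PySem.List.mem_sorted _ _ _ _).mp (by rw [hL]; exact List.mem_cons_self)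
    have h1 : m ≤ t.foldl min y := PySem.List.key_head_sorted_le _ _ hL _ hmem
    have h2 : t.foldl min y ≤ m := hlow m hmS
    rw [PySem.List.pyGetD_zero_cons]
    omega

-- the last element of sorted (y :: t) is the running maximum
theorem pv_sorted_last (y : Int) (t : List Int) :
    PySem.List.pyGetD (PySem.List.sorted (y :: t) (fun x => x) false) (-1) 0 = t.foldl max y := by
  have hmax := PySem.List.max?_id_cons y t
  have hmem : t.foldl max y ∈ y :: t := PySem.List.max?_mem hmax
  have hhigh : ∀ z ∈ y :: t, z ≤ t.foldl max y := PySem.List.max?_isMax hmax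
  have hne : PySem.List.sorted (y :: t) (fun x => x) false ≠ [] := by
    intro h; exact absurd ((PySem.List.sorted_eq_nil_iff _ _ _).mp h) (by simp)
  set L := PySem.List.sorted (y :: t) (fun x => x) false with hLdef
  rw [PySem.List.pyGetD_neg_one L 0 hne]
  have hglmem : L.getLast hne ∈ y :: t := (PySem.List.mem_sorted _ _ _ _).mp (List.getLast_mem hne)
  have h1 : L.getLast hne ≤ t.foldl max y := hhigh _ hglmem
  -- the max is some element of L, and every element of L is ≤ its last element by sortedness
  have hmemL : t.foldl max y ∈ L := (PySem.List.mem_sorted _ _ _ _).mpr hmem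
  obtain ⟨p, hp, hpe⟩ := List.getElem_of_mem hmemL
  have hlen : 0 < L.length := List.length_pos_iff.mpr hne
  have hgl : L.getLast hne = L[L.length - 1] := List.getLast_eq_getElem hne
  have h2 : L[p] ≤ L[L.length - 1] := by
    have := PySem.List.sorted_id_getElem_mono (xs := y :: t) (p := p) (q := L.length - 1)
      (by omega) (by simpa [← hLdef] using Nat.sub_lt hlen one_pos)
    simpa [← hLdef] using this
  rw [hpe] at h2
  rw [hgl]
  omega

-- ===== VERDICT (by name: the statement is the Claim_ definition above) =====
theorem get_vertical_offsets_from_anchor_spec : Claim_equal_get_vertical_offsets_from_anchor := by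
  intro block _ hpre
  unfold Spec_get_vertical_offsets_from_anchor get_vertical_offsets_from_anchor get_vertical_offsets_from_anchor_alt
  match block with
  | [] => exact absurd rfl hpre
  | x :: t =>
    simp only [List.foldl_cons, List.map_cons]
    rw [show ((match (none : Option Int) with
        | none => some x.2
        | some u => if x.2 > u then some x.2 else some u),
        (match (none : Option Int) with
        | none => some x.2
        | some d => if x.2 < d then some x.2 else some d)) = ((some x.2 : Option Int), (some x.2 : Option Int)) from rfl]
    rw [pv_fold_state t x.2 x.2]
    simp only [Option.getD_some]
    rw [pv_sorted_head x.2 (t.map (fun d => d.2)), pv_sorted_last x.2 (t.map (fun d => d.2))]
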